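-- pv_equiv track=rewrite | github.com/balojey/aviator | ngram_predictions.py | recommend_next_category
-- ===== SOURCE A (Python) =====
-- from collections import defaultdict
--
-- def build_ngrams(history, n):
--     ngrams = defaultdict(list)
--     for i in range(len(history) - n):
--         context = tuple(history[i:i+n])
--         next_item = history[i+n]
--         ngrams[context].append(next_item)
--     return ngrams
--
-- def recommend_next_category(history):
--     if len(history) < 2:
--         return 'B'
--     ngrams = build_ngrams(history, 2)
--     context = tuple(history[-2:])
--     possible = ngrams.get(context, [])
--     if not possible:
--         return 'B'
--     counts = {'B': 0, 'P': 0, 'Pk': 0}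
--     for item in possible:
--         counts[item] += 1
--     return max(counts.items(), key=lambda x: x[1])[0]
-- ===== SOURCE B (Python) =====
-- def recommend_next_category(history):
--     if len(history) < 2:
--         return 'B'
--     c1, c2 = history[-2], history[-1]
--     counts = {'B': 0, 'P': 0, 'Pk': 0}
--     for i in range(len(history) - 2):
--         if history[i] == c1 and history[i + 1] == c2:
--             counts[history[i + 2]] += 1
--     if counts['P'] <= counts['B'] and counts['Pk'] <= counts['B']:
--         return 'B'
--     if counts['Pk'] <= counts['P']:
--         return 'P'
--     return 'Pk'
-- ===== Notes on version B (the rewrite author's own statement) =====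
-- stated objective: faster
-- what changed: B drops the build_ngrams index of all bigram contexts and instead tallies, in one pass with a single 3-key counter, the successors of the last bigram, then resolves the argmax with an explicit comparison chain.
import Mathlib
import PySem

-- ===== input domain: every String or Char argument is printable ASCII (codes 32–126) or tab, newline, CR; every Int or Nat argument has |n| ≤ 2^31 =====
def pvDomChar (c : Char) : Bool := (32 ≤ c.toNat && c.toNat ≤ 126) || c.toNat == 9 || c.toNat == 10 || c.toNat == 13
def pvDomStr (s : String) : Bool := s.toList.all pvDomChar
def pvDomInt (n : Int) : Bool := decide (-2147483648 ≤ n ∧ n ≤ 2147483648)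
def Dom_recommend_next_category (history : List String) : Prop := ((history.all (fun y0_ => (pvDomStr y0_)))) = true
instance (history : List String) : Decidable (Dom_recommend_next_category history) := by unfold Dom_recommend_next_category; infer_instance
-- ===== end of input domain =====

-- B drops A's full bigram->successors index (build_ngrams) and instead tallies, in one pass with a
-- single 3-key counter, the successors of the last bigram, resolving the argmax by an explicit chain.

-- ===== PORT A =====
def build_ngrams (history : List String) (n : Int) : PySem.Dict (List String) (List String) :=
  (PySem.List.pyRange 0 (PySem.List.len history - n) 1).foldl
    (fun d i =>
      let context := PySem.List.slice history (some i) (some (i + n))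
      let next_item := PySem.List.pyGetD history (i + n) ""
      d.modify context [] (· ++ [next_item]))
    PySem.Dict.empty

def recommend_next_category (history : List String) : String :=
  if PySem.List.len history < 2 then "B"
  else
    let ngrams := build_ngrams history 2
    let context := PySem.List.slice history (some (-2)) none
    let possible := ngrams.getD context []
    if possible = [] then "B"
    else
      let counts := possible.foldl (fun c item => c.modify item 0 (· + 1))
        (PySem.Dict.ofList [("B", (0:Int)), ("P", 0), ("Pk", 0)])
      match PySem.List.max? counts.items (fun x => x.2) with
      | some m => m.1
      | none => "B"

-- ===== PORT B =====
def recommend_next_category_alt (history : List String) : String :=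
  if PySem.List.len history < 2 then "B"
  else
    let c1 := PySem.List.pyGetD history (-2) ""
    let c2 := PySem.List.pyGetD history (-1) ""
    let counts := (PySem.List.pyRange 0 (PySem.List.len history - 2) 1).foldl
      (fun c i =>
        if PySem.List.pyGetD history i "" = c1 ∧ PySem.List.pyGetD history (i + 1) "" = c2 then
          c.modify (PySem.List.pyGetD history (i + 2) "") 0 (· + 1)
        else c)
      (PySem.Dict.ofList [("B", (0:Int)), ("P", 0), ("Pk", 0)])
    if counts.getD "P" 0 ≤ counts.getD "B" 0 ∧ counts.getD "Pk" 0 ≤ counts.getD "B" 0 then "B"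
    else if counts.getD "Pk" 0 ≤ counts.getD "P" 0 then "P"
    else "Pk"

-- ===== PRECONDITION & SPEC =====
-- Pre_ excludes exactly the inputs on which A raises KeyError (a successor of the last bigram that
-- is not one of the keys 'B'/'P'/'Pk'); B raises the same KeyError on exactly those inputs.
def Pre_recommend_next_category (history : List String) : Prop :=
  ∀ i ∈ List.range (history.length - 2),
    (history.getD i "" = history.getD (history.length - 2) "" ∧
     history.getD (i + 1) "" = history.getD (history.length - 1) "") →
    history.getD (i + 2) "" ∈ (["B", "P", "Pk"] : List String)
instance (history : List String) : Decidable (Pre_recommend_next_category history) := by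
  unfold Pre_recommend_next_category; infer_instance

def pvWitness_recommend_next_category : List String := ["B", "P", "B", "B", "P"]

def Spec_recommend_next_category (history : List String) (out : String) : Prop := out = recommend_next_category_alt history
instance (history : List String) (out : String) : Decidable (Spec_recommend_next_category history out) := by unfold Spec_recommend_next_category; infer_instance

-- ===== CLAIM (what is proved, stated in full; the proofs are below) =====
def Claim_equal_recommend_next_category : Prop := ∀ (history : List String), Dom_recommend_next_category history → Pre_recommend_next_category history → Spec_recommend_next_category history (recommend_next_category history)

-- ===== LEMMAS AND PROOFS =====

-- the successors of the last bigram, in scan order: the shared core of both programs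
def succList (history : List String) : List String :=
  ((List.range (history.length - 2)).filter
      (fun k => decide (history.getD k "" = history.getD (history.length - 2) "" ∧
                        history.getD (k + 1) "" = history.getD (history.length - 1) ""))).map
    (fun k => history.getD (k + 2) "")

lemma drop_take_two (xs : List String) (k : Nat) (hk : k + 1 < xs.length) :
    (xs.drop k).take 2 = [xs.getD k "", xs.getD (k + 1) ""] := by
  have h1 : xs.drop k = xs[k] :: xs.drop (k + 1) := List.drop_eq_getElem_cons (by omega)
  have h2 : xs.drop (k + 1) = xs[k + 1] :: xs.drop (k + 2) := List.drop_eq_getElem_cons (by omega)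
  rw [h1, h2]
  simp only [List.take_succ_cons, List.take_zero, List.getD_eq_getElem?_getD,
    List.getElem?_eq_getElem (show k < xs.length by omega), List.getElem?_eq_getElem hk,
    Option.getD_some]

-- A's lookup of the last bigram in the full index is exactly the one-pass successor list
lemma A_possible (history : List String) (hL2 : 2 ≤ history.length) :
    (build_ngrams history 2).getD (PySem.List.slice history (some (-2)) none) []
      = succList history := by
  unfold build_ngrams
  have hcast : PySem.List.len history - 2 = ((history.length - 2 : Nat) : Int) := by
    simp [PySem.List.len_eq]; omega
  rw [hcast, PySem.List.pyRange_zero_nat, List.foldl_map]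
  have hidx : history.length - 2 + 1 = history.length - 1 := by omega
  have htgt : PySem.List.slice history (some (-2)) none
      = [history.getD (history.length - 2) "", history.getD (history.length - 1) ""] := by
    rw [PySem.List.slice_from_neg_ofNat history 2 (by norm_num)]
    have h1 : history.drop (history.length - 2)
        = (history.drop (history.length - 2)).take 2 := by
      rw [List.take_of_length_le (by simp; omega)]
    rw [h1, drop_take_two history (history.length - 2) (by omega), hidx]
  show (List.foldl (fun (d : PySem.Dict (List String) (List String)) (k : Nat) =>
      d.modify (PySem.List.slice history (some (k : Int)) (some ((k : Int) + 2))) []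
        (· ++ [PySem.List.pyGetD history ((k : Int) + 2) ""]))
      PySem.Dict.empty (List.range (history.length - 2))).getD
      (PySem.List.slice history (some (-2)) none) [] = succList history
  rw [← List.foldl_map
    (f := fun k : Nat => (PySem.List.slice history (some (k : Int)) (some ((k : Int) + 2)),
                     PySem.List.pyGetD history ((k : Int) + 2) ""))
    (g := fun (d : PySem.Dict (List String) (List String)) p => d.modify p.1 [] (· ++ [p.2])),
    PySem.Dict.getD_foldl_modify_append, PySem.Dict.getD_empty, List.filter_map,
    List.map_map, List.nil_append]
  have hfil : (List.range (history.length - 2)).filter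
      ((fun p => p.1 == PySem.List.slice history (some (-2)) none) ∘
        (fun k : Nat => (PySem.List.slice history (some (k : Int)) (some ((k : Int) + 2)),
                         PySem.List.pyGetD history ((k : Int) + 2) "")))
      = (List.range (history.length - 2)).filter
        (fun k => decide (history.getD k "" = history.getD (history.length - 2) "" ∧
                          history.getD (k + 1) "" = history.getD (history.length - 1) "")) := by
    apply List.filter_congr
    intro k hk
    rw [List.mem_range] at hk
    simp only [Function.comp_apply]
    have h2 : ((k : Int) + 2) = ((k + 2 : Nat) : Int) := by push_cast; ring
    rw [h2, PySem.List.slice_natCast]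
    have h3 : k + 2 - k = 2 := by omega
    rw [h3, drop_take_two history k (by omega), htgt]
    rw [beq_eq_decide]
    simp [List.cons.injEq]
  rw [hfil]
  unfold succList
  apply List.map_congr_left
  intro k _
  simp only [Function.comp_apply]
  have h2 : ((k : Int) + 2) = ((k + 2 : Nat) : Int) := by push_cast; ring
  rw [h2, PySem.List.pyGetD_natCast]

-- a guarded fold is the fold of the filtered, mapped list
lemma foldl_if_filter_map {α β γ : Type} (l : List α) (P : α → Prop) [DecidablePred P]
    (f : α → β) (g : γ → β → γ) (a : γ) :
    l.foldl (fun c i => if P i then g c (f i) else c) a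
      = ((l.filter (fun i => decide (P i))).map f).foldl g a := by
  induction l generalizing a with
  | nil => rfl
  | cons x t ih =>
    by_cases hx : P x <;> simp [hx, ih]

-- B's guarded scan is the counting fold over the same successor list
lemma B_counts (history : List String) (hL2 : 2 ≤ history.length) :
    (PySem.List.pyRange 0 (PySem.List.len history - 2) 1).foldl
      (fun c i =>
        if PySem.List.pyGetD history i "" = PySem.List.pyGetD history (-2) "" ∧
            PySem.List.pyGetD history (i + 1) "" = PySem.List.pyGetD history (-1) "" then
          c.modify (PySem.List.pyGetD history (i + 2) "") 0 (· + 1)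
        else c)
      (PySem.Dict.ofList [("B", (0:Int)), ("P", 0), ("Pk", 0)])
    = (succList history).foldl (fun c item => c.modify item 0 (· + 1))
        (PySem.Dict.ofList [("B", (0:Int)), ("P", 0), ("Pk", 0)]) := by
  have hcast : PySem.List.len history - 2 = ((history.length - 2 : Nat) : Int) := by
    simp [PySem.List.len_eq]; omega
  rw [hcast, PySem.List.pyRange_zero_nat, List.foldl_map]
  have hc1 : PySem.List.pyGetD history (-2) "" = history.getD (history.length - 2) "" := by
    rw [PySem.List.pyGetD_neg_ofNat history 2 "" (by norm_num) (by omega)]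
    rw [List.getD_eq_getElem?_getD, List.getElem?_eq_getElem (by omega), Option.getD_some]
  have hc2 : PySem.List.pyGetD history (-1) "" = history.getD (history.length - 1) "" := by
    rw [PySem.List.pyGetD_neg_ofNat history 1 "" (by norm_num) (by omega)]
    rw [List.getD_eq_getElem?_getD, List.getElem?_eq_getElem (by omega), Option.getD_some]
  rw [PySem.List.foldl_congr_mem _ _
    (fun (c : PySem.Dict String Int) (k : Nat) =>
      if history.getD k "" = history.getD (history.length - 2) "" ∧
          history.getD (k + 1) "" = history.getD (history.length - 1) "" then
        c.modify (history.getD (k + 2) "") 0 (· + 1)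
      else c) _ ?_]
  · rw [foldl_if_filter_map (List.range (history.length - 2))
      (fun k => history.getD k "" = history.getD (history.length - 2) "" ∧
                history.getD (k + 1) "" = history.getD (history.length - 1) "")
      (fun k => history.getD (k + 2) "")
      (fun (c : PySem.Dict String Int) item => c.modify item 0 (· + 1))]
    rfl
  · intro acc k _
    have e1 : ((k : Int) + 1) = ((k + 1 : Nat) : Int) := by push_cast; ring
    have e2 : ((k : Int) + 2) = ((k + 2 : Nat) : Int) := by push_cast; ring
    rw [e1, e2, PySem.List.pyGetD_natCast, PySem.List.pyGetD_natCast,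
      PySem.List.pyGetD_natCast, hc1, hc2]

lemma ofList3_eq (b p pk : Int) :
    PySem.Dict.ofList [("B", b), ("P", p), ("Pk", pk)] = PySem.Dict.mk [("B", b), ("P", p), ("Pk", pk)] := by
  simp [PySem.Dict.ofList, PySem.Dict.update, PySem.Dict.insert, PySem.Dict.contains, PySem.Dict.empty]

lemma modify3_B (b p pk : Int) :
    (PySem.Dict.mk [("B", b), ("P", p), ("Pk", pk)]).modify "B" 0 (· + 1)
      = PySem.Dict.mk [("B", b + 1), ("P", p), ("Pk", pk)] := by
  simp [PySem.Dict.modify, PySem.Dict.insert, PySem.Dict.contains, PySem.Dict.getD, PySem.Dict.get?]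

lemma modify3_P (b p pk : Int) :
    (PySem.Dict.mk [("B", b), ("P", p), ("Pk", pk)]).modify "P" 0 (· + 1)
      = PySem.Dict.mk [("B", b), ("P", p + 1), ("Pk", pk)] := by
  simp [PySem.Dict.modify, PySem.Dict.insert, PySem.Dict.contains, PySem.Dict.getD, PySem.Dict.get?]

lemma modify3_Pk (b p pk : Int) :
    (PySem.Dict.mk [("B", b), ("P", p), ("Pk", pk)]).modify "Pk" 0 (· + 1)
      = PySem.Dict.mk [("B", b), ("P", p), ("Pk", pk + 1)] := by
  simp [PySem.Dict.modify, PySem.Dict.insert, PySem.Dict.contains, PySem.Dict.getD, PySem.Dict.get?]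

-- the counting loop over a list of B/P/Pk values, run on the literal 3-key dict
lemma foldl_modify3 (L : List String) (hL : ∀ x ∈ L, x = "B" ∨ x = "P" ∨ x = "Pk") :
    ∀ b p pk : Int,
      L.foldl (fun c item => c.modify item 0 (· + 1)) (PySem.Dict.mk [("B", b), ("P", p), ("Pk", pk)])
        = PySem.Dict.mk [("B", b + L.count "B"), ("P", p + L.count "P"), ("Pk", pk + L.count "Pk")] := by
  induction L with
  | nil => intro b p pk; simp
  | cons x t ih =>
    intro b p pk
    have hx := hL x (by simp)
    have ht : ∀ y ∈ t, y = "B" ∨ y = "P" ∨ y = "Pk" := fun y hy => hL y (by simp [hy])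
    rcases hx with h | h | h <;> subst h <;>
      simp only [List.foldl_cons, modify3_B, modify3_P, modify3_Pk, ih ht] <;>
      simp <;> ring

-- Python's max over the 3-key items, insertion-order tie-break made explicit
lemma max3 (b p pk : Int) : PySem.List.max? [("B", b), ("P", p), ("Pk", pk)] (fun x => x.2) =
    some (if p ≤ b ∧ pk ≤ b then ("B", b) else if pk ≤ p then ("P", p) else ("Pk", pk)) := by
  simp [PySem.List.max?]
  split_ifs <;> simp <;> omega

lemma getD3_B (b p pk : Int) : (PySem.Dict.mk [("B", b), ("P", p), ("Pk", pk)]).getD "B" 0 = b := by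
  simp [PySem.Dict.getD, PySem.Dict.get?]
lemma getD3_P (b p pk : Int) : (PySem.Dict.mk [("B", b), ("P", p), ("Pk", pk)]).getD "P" 0 = p := by
  simp [PySem.Dict.getD, PySem.Dict.get?]
lemma getD3_Pk (b p pk : Int) : (PySem.Dict.mk [("B", b), ("P", p), ("Pk", pk)]).getD "Pk" 0 = pk := by
  simp [PySem.Dict.getD, PySem.Dict.get?]

-- ===== VERDICT (by name: the statement is the Claim_ definition above) =====
theorem recommend_next_category_spec : Claim_equal_recommend_next_category := by
  intro history _ hpre
  unfold Spec_recommend_next_category recommend_next_category recommend_next_category_alt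
  by_cases hlen : PySem.List.len history < 2
  · rw [if_pos hlen, if_pos hlen]
  · rw [if_neg hlen, if_neg hlen]
    have hL2 : 2 ≤ history.length := by simp [PySem.List.len_eq] at hlen; omega
    have hS : ∀ x ∈ succList history, x = "B" ∨ x = "P" ∨ x = "Pk" := by
      intro x hx
      unfold succList at hx
      simp only [List.mem_map, List.mem_filter, List.mem_range, decide_eq_true_eq] at hx
      obtain ⟨k, ⟨hk, hcond⟩, rfl⟩ := hx
      have := hpre k (by rw [List.mem_range]; exact hk) hcond
      simpa using this
    simp only [A_possible history hL2, B_counts history hL2]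
    simp only [ofList3_eq, foldl_modify3 (succList history) hS, getD3_B, getD3_P, getD3_Pk]
    by_cases hS0 : succList history = []
    · rw [if_pos hS0]
      simp [hS0]
    · rw [if_neg hS0, max3]
      simp only [Int.zero_add]
      split_ifs <;> rfl
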